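-- pv_equiv track=rewrite | github.com/clark2668/ehe_studies | studies/2021.05_sim_studies/juliet_practice/i3hdf_to_df.py | split_obs_str
-- ===== SOURCE A (Python) =====
-- def split_obs_str(obs):
--     if not isinstance(obs, list):
--         obs = [obs]
--     obs_dict = {}
--     for o in obs:
--         splitted = o.split('.')
--         key = splitted[0]
--         current_content = obs_dict.get(key, [])
--         current_content.append(splitted[1])
--         obs_dict[key] = current_content
--     return obs_dict
-- ===== SOURCE B (Python) =====
-- def split_obs_str(obs):
--     if not isinstance(obs, list):
--         obs = [obs]
--     parts = [o.split('.') for o in obs]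
--     keys = list(dict.fromkeys(p[0] for p in parts))
--     return {k: [p[1] for p in parts if p[0] == k] for k in keys}
-- ===== Notes on version B (the rewrite author's own statement) =====
-- stated objective: alternative
-- what changed: Replaces the single-pass dict accumulation (get-append-reinsert per element) by a two-phase plan: split everything once, take the ordered-deduplicated key list, and build each group's value list with one filter comprehension per distinct key.
import Mathlib
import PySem

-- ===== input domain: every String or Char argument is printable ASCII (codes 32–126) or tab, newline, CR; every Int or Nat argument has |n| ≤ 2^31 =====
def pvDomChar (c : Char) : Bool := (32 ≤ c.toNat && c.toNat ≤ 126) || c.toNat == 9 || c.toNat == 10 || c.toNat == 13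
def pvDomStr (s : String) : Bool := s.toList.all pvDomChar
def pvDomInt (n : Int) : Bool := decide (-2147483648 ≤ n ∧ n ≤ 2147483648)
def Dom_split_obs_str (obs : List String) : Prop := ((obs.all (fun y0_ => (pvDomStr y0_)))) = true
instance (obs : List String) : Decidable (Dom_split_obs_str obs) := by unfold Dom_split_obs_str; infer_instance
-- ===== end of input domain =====

-- B groups by a split-once / dedup-keys / filter-per-key plan instead of A's dict accumulation; same result, no speed claim.

-- ===== PORT A =====
def split_obs_str (obs : List String) : List (String × List String) :=
  let d := obs.foldl (fun d o =>
    let splitted := (PySem.Str.split? o ".").getD []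
    let key := (PySem.List.pyGet? splitted 0).getD ""
    let current_content := d.getD key [] ++ [(PySem.List.pyGet? splitted 1).getD ""]
    d.insert key current_content) PySem.Dict.empty
  d.items

-- ===== PORT B =====
def split_obs_str_alt (obs : List String) : List (String × List String) :=
  let parts := obs.map (fun o => (PySem.Str.split? o ".").getD [])
  let keys := PySem.List.dedup (parts.map (fun p => (PySem.List.pyGet? p 0).getD ""))
  keys.map (fun k =>
    (k, (parts.filter (fun p => (PySem.List.pyGet? p 0).getD "" == k)).map
          (fun p => (PySem.List.pyGet? p 1).getD "")))

-- ===== PRECONDITION & SPEC =====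
-- Pre_ excludes exactly the inputs containing a string with no '.', on which A raises IndexError.
def Pre_split_obs_str (obs : List String) : Prop := ∀ o ∈ obs, '.' ∈ o.toList
instance (obs : List String) : Decidable (Pre_split_obs_str obs) := by unfold Pre_split_obs_str; infer_instance
def pvWitness_split_obs_str : List String := ["a.b", "c.d", "a.e"]
def Spec_split_obs_str (obs : List String) (out : List (String × List String)) : Prop := out = split_obs_str_alt obs
instance (obs : List String) (out : List (String × List String)) : Decidable (Spec_split_obs_str obs out) := by unfold Spec_split_obs_str; infer_instance

-- ===== CLAIM (what is proved, stated in full; the proofs are below) =====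
def Claim_equal_split_obs_str : Prop := ∀ (obs : List String), Dom_split_obs_str obs → Pre_split_obs_str obs → Spec_split_obs_str obs (split_obs_str obs)

-- ===== LEMMAS AND PROOFS =====


-- key/value extracted from one string, as both ports compute them
def pvKeyOf (o : String) : String := (PySem.List.pyGet? ((PySem.Str.split? o ".").getD []) 0).getD ""
def pvValOf (o : String) : String := (PySem.List.pyGet? ((PySem.Str.split? o ".").getD []) 1).getD ""

theorem split_obs_str_eq_alt (obs : List String) : split_obs_str obs = split_obs_str_alt obs := by
  have hD : split_obs_str obs =
      (obs.foldl (fun d o => d.insert (pvKeyOf o) (d.getD (pvKeyOf o) [] ++ [pvValOf o]))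
        PySem.Dict.empty).items := rfl
  set D := obs.foldl (fun d o => d.insert (pvKeyOf o) (d.getD (pvKeyOf o) [] ++ [pvValOf o]))
        PySem.Dict.empty with hDdef
  have hnodup : D.keys.Nodup := by
    exact PySem.Dict.nodup_keys_foldl_insert_key obs pvKeyOf _ _ PySem.Dict.nodup_keys_empty
  have hkeys : D.keys = PySem.Set.ofList (obs.map pvKeyOf) := by
    rw [hDdef, PySem.Dict.keys_foldl_insert_key, PySem.Dict.keys_empty,
      PySem.Set.update_nil_left]
  have hget : ∀ c, D.getD c [] = (obs.filter (fun o => pvKeyOf o == c)).map pvValOf := by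
    intro c
    have h1 : D = (obs.map (fun o => (pvKeyOf o, pvValOf o))).foldl
        (fun d p => d.modify p.1 [] (fun x => x ++ [p.2])) PySem.Dict.empty := by
      rw [List.foldl_map]; rfl
    rw [h1, PySem.Dict.getD_foldl_modify_append, PySem.Dict.getD_empty]
    simp [List.filter_map, List.map_map, Function.comp_def]
  rw [hD]
  rw [PySem.Dict.items_eq_map_keys D hnodup [], hkeys]
  unfold split_obs_str_alt
  simp only [List.map_map, List.filter_map, Function.comp_def, PySem.List.dedup_eq_ofList]
  apply List.map_congr_left
  intro k _
  rw [hget k]; rfl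

-- ===== VERDICT (by name: the statement is the Claim_ definition above) =====
theorem split_obs_str_spec : Claim_equal_split_obs_str := by
  intro obs _ _
  exact split_obs_str_eq_alt obs
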